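-- pv_equiv track=rewrite | github.com/chris-khan-1/motogp-analytics | app/web_scraping/pdf_extraction.py | split_classified_and_non_classified
-- ===== SOURCE A (Python) =====
-- def split_classified_and_non_classified(text: str) -> tuple[list[str], list[str]]:
--     classified = []
--     non_classified = []
--
--     lines = [line.strip() for line in text.splitlines() if line.strip()]
--
--     in_classified_section = False
--     in_non_classified_section = False
--
--     for line in lines:
--         if line.lower().startswith("pos pts # rider"):
--             in_classified_section = True
--             continue
--         if line.lower().startswith("not classified"):
--             in_classified_section = False
--             in_non_classified_section = True
--             continue
--
--         if in_classified_section: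
--             classified.append(line)
--         elif in_non_classified_section:
--             if line and line[0].isdigit():
--                 non_classified.append(line)
--             else:
--                 break  # stop when non-classified is no longer numbers
--
--     return classified, non_classified
-- ===== SOURCE B (Python) =====
-- def split_classified_and_non_classified(text: str) -> tuple[list[str], list[str]]:
--     lines = [line.strip() for line in text.splitlines() if line.strip()]
--
--     def marker(line):
--         low = line.lower()
--         if low.startswith("pos pts # rider"):
--             return 1
--         if low.startswith("not classified"):
--             return 2
--         return 0
--
--     # label each line with the section of the last marker seen so far
--     labelled = []
--     state = 0
--     for line in lines:
--         m = marker(line)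
--         if m:
--             state = m
--         labelled.append((line, m, state))
--
--     # truncate at the first non-marker, non-digit line of the non-classified section
--     stop = next((i for i, (l, m, s) in enumerate(labelled)
--                  if m == 0 and s == 2 and not l[0].isdigit()), len(labelled))
--     kept = labelled[:stop]
--
--     classified = [l for l, m, s in kept if m == 0 and s == 1]
--     non_classified = [l for l, m, s in kept if m == 0 and s == 2]
--     return classified, non_classified
-- ===== Notes on version B (the rewrite author's own statement) =====
-- stated objective: alternative
-- what changed: A's single state-machine pass with two mutable flags and a mid-loop break is replaced by a label/truncate/partition pipeline: each cleaned line is tagged with its section (last marker seen), the list is cut at the first non-digit non-classified line, and the two outputs are two filters over the truncated tagged list.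
import Mathlib
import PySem

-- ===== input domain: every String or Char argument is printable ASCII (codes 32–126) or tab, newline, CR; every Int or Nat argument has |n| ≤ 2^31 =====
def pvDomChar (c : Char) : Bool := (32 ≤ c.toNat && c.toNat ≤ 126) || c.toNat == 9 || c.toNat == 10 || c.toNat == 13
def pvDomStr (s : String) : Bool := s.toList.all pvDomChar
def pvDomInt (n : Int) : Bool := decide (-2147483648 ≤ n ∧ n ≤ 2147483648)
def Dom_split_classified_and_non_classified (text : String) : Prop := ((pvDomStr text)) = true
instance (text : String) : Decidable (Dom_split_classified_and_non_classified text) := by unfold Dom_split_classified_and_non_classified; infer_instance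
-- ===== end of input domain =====

-- B replaces A's single pass with mutable flags and a break by a label/truncate/partition
-- decomposition (same cost, alternative structure); return values proved equal on all inputs.

-- shared helpers (both Pythons clean the lines and test the same prefixes)
def pvCleanLines (text : String) : List String :=
  ((PySem.Str.splitlines text).map PySem.Str.strip).filter (fun l => !l.toList.isEmpty)

def pvHeaderP (l : String) : Bool := PySem.Str.startswith (PySem.Str.lower l) "pos pts # rider"
def pvNcP (l : String) : Bool := PySem.Str.startswith (PySem.Str.lower l) "not classified"
-- Python's `line and line[0].isdigit()`
def pvDigitHead (l : String) : Bool :=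
  match l.toList with
  | [] => false
  | c :: _ => PySem.Chars.isdigit c

-- ===== PORT A =====
def pvLoopA (inC inNC : Bool) (c nc : List String) : List String → List String × List String
  | [] => (c, nc)
  | l :: ls =>
    if pvHeaderP l then pvLoopA true inNC c nc ls
    else if pvNcP l then pvLoopA false true c nc ls
    else if inC then pvLoopA inC inNC (c ++ [l]) nc ls
    else if inNC then
      if pvDigitHead l then pvLoopA inC inNC c (nc ++ [l]) ls
      else (c, nc)   -- break
    else pvLoopA inC inNC c nc ls

def split_classified_and_non_classified (text : String) : List String × List String :=
  pvLoopA false false [] [] (pvCleanLines text)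

-- ===== PORT B =====
def pvMarker (l : String) : Int :=
  let low := PySem.Str.lower l
  if PySem.Str.startswith low "pos pts # rider" then 1
  else if PySem.Str.startswith low "not classified" then 2
  else 0

def pvLabel (s : Int) : List String → List (String × Int × Int)
  | [] => []
  | l :: ls =>
    let m := pvMarker l
    let s' := if m ≠ 0 then m else s
    (l, m, s') :: pvLabel s' ls

def pvStopPred (t : String × Int × Int) : Bool :=
  t.2.1 == 0 && t.2.2 == 2 && !pvDigitHead t.1

def split_classified_and_non_classified_alt (text : String) : List String × List String :=
  let labelled := pvLabel 0 (pvCleanLines text)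
  let kept := labelled.take (labelled.findIdx pvStopPred)
  ((kept.filter (fun t => t.2.1 == 0 && t.2.2 == 1)).map (·.1),
   (kept.filter (fun t => t.2.1 == 0 && t.2.2 == 2)).map (·.1))

-- ===== PRECONDITION & SPEC =====
def Spec_split_classified_and_non_classified (text : String) (out : List String × List String) : Prop := out = split_classified_and_non_classified_alt text
instance (text : String) (out : List String × List String) : Decidable (Spec_split_classified_and_non_classified text out) := by unfold Spec_split_classified_and_non_classified; infer_instance

-- ===== CLAIM (what is proved, stated in full; the proofs are below) =====
def Claim_equal_split_classified_and_non_classified : Prop := ∀ (text : String), Dom_split_classified_and_non_classified text → Spec_split_classified_and_non_classified text (split_classified_and_non_classified text)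

-- ===== LEMMAS AND PROOFS =====

-- reference function: the split both ports compute, indexed by the section state
-- (0 = none, 1 = classified, 2 = non-classified)
def pvGo (s : Int) : List String → List String × List String
  | [] => ([], [])
  | l :: ls =>
    if pvHeaderP l then pvGo 1 ls
    else if pvNcP l then pvGo 2 ls
    else if s = 1 then (l :: (pvGo s ls).1, (pvGo s ls).2)
    else if s = 2 then
      (if pvDigitHead l then ((pvGo s ls).1, l :: (pvGo s ls).2) else ([], []))
    else pvGo s ls

def pvSigma (inC inNC : Bool) : Int := if inC then 1 else if inNC then 2 else 0

theorem pvLoopA_eq_go (ls : List String) : ∀ (inC inNC : Bool) (c nc : List String),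
    pvLoopA inC inNC c nc ls
      = (c ++ (pvGo (pvSigma inC inNC) ls).1, nc ++ (pvGo (pvSigma inC inNC) ls).2) := by
  induction ls with
  | nil => intro inC inNC c nc; simp [pvLoopA, pvGo]
  | cons l ls ih =>
    intro inC inNC c nc
    by_cases hh : pvHeaderP l
    · simp [pvLoopA, pvGo, hh, ih, pvSigma]
    · by_cases hn : pvNcP l
      · simp [pvLoopA, pvGo, hh, hn, ih, pvSigma]
      · cases inC with
        | true => simp [pvLoopA, pvGo, hh, hn, ih, pvSigma]
        | false =>
          cases inNC with
          | true =>
            by_cases hd : pvDigitHead l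
            · simp [pvLoopA, pvGo, hh, hn, hd, ih, pvSigma]
            · simp [pvLoopA, pvGo, hh, hn, hd, pvSigma]
          | false => simp [pvLoopA, pvGo, hh, hn, ih, pvSigma]

def pvPipe (s : Int) (ls : List String) : List String × List String :=
  let lab := pvLabel s ls
  let kept := lab.take (lab.findIdx pvStopPred)
  ((kept.filter (fun t => t.2.1 == 0 && t.2.2 == 1)).map (·.1),
   (kept.filter (fun t => t.2.1 == 0 && t.2.2 == 2)).map (·.1))

theorem pvMarker_eq (l : String) :
    pvMarker l = if pvHeaderP l then 1 else if pvNcP l then 2 else 0 := rfl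

theorem pvPipe_eq_go (ls : List String) : ∀ (s : Int), pvPipe s ls = pvGo s ls := by
  induction ls with
  | nil => intro s; simp [pvPipe, pvLabel, pvGo]
  | cons l ls ih =>
    intro s
    by_cases hh : pvHeaderP l
    · have hm : pvMarker l = 1 := by simp [pvMarker_eq, hh]
      simp only [pvPipe, pvLabel, pvGo, hh, hm, pvStopPred, List.findIdx_cons]
      simpa [pvPipe, Prod.ext_iff, pvStopPred] using ih 1
    · by_cases hn : pvNcP l
      · have hm : pvMarker l = 2 := by simp [pvMarker_eq, hh, hn]
        simp only [pvPipe, pvLabel, pvGo, hh, hn, hm, pvStopPred, List.findIdx_cons]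
        simpa [pvPipe, Prod.ext_iff, pvStopPred] using ih 2
      · have hm : pvMarker l = 0 := by simp [pvMarker_eq, hh, hn]
        by_cases h1 : s = 1
        · subst h1
          simp only [pvPipe, pvLabel, pvGo, hh, hn, hm, pvStopPred, List.findIdx_cons]
          simpa [pvPipe, Prod.ext_iff, pvStopPred] using ih 1
        · by_cases h2 : s = 2
          · subst h2
            by_cases hd : pvDigitHead l
            · simp only [pvPipe, pvLabel, pvGo, hh, hn, hm, hd, pvStopPred, List.findIdx_cons]
              simpa [pvPipe, Prod.ext_iff, pvStopPred, hd] using ih 2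
            · simp [pvPipe, pvLabel, pvGo, hh, hn, hm, hd, pvStopPred, List.findIdx_cons]
          · have h1' : (s == 1) = false := by simp [h1]
            have h2' : (s == 2) = false := by simp [h2]
            simp only [pvPipe, pvLabel, pvGo, hh, hn, hm, h1, h2,
              pvStopPred, List.findIdx_cons]
            simpa [pvPipe, Prod.ext_iff, pvStopPred, h1', h2'] using ih s

-- ===== VERDICT (by name: the statement is the Claim_ definition above) =====
theorem split_classified_and_non_classified_spec : Claim_equal_split_classified_and_non_classified := by
  intro text _
  unfold Spec_split_classified_and_non_classified
  show split_classified_and_non_classified text = split_classified_and_non_classified_alt text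
  have h1 : split_classified_and_non_classified text = pvGo 0 (pvCleanLines text) := by
    simpa [pvSigma] using pvLoopA_eq_go (pvCleanLines text) false false [] []
  have h2 : split_classified_and_non_classified_alt text = pvPipe 0 (pvCleanLines text) := rfl
  rw [h1, h2, pvPipe_eq_go]
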